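-- pv_equiv track=rewrite | github.com/Alexander-Berg/2022-tests-examples-2 | sandbox/general/test_stages_speed.py | get_time_distribution
-- ===== SOURCE A (Python) =====
-- def get_time_distribution(tasks_stages_time):
--     stages = {}
--     for info in tasks_stages_time:
--         for stage_name, stage_data in info['stages'].items():
--             if stage_name not in stages:
--                 stages[stage_name] = []
--             stages[stage_name].append(stage_data)
--
--     for stage_name, stage_distribution in stages.items():
--         stages[stage_name] = sorted(stages[stage_name], key=lambda x: x[0])
--
--     return stages
-- ===== SOURCE B (Python) =====
-- def get_time_distribution(tasks_stages_time):
--     # Flatten once, collect stage names in first-appearance order,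
--     # then build each bucket wholesale by filtering + one sort.
--     flat = [(name, data)
--             for info in tasks_stages_time
--             for name, data in info['stages'].items()]
--     names = []
--     for name, _ in flat:
--         if name not in names:
--             names.append(name)
--     return {name: sorted([d for n, d in flat if n == name], key=lambda x: x[0])
--             for name in names}
-- ===== Notes on version B (the rewrite author's own statement) =====
-- stated objective: alternative
-- what changed: Instead of incrementally growing dict buckets inside nested loops and then re-sorting every bucket in a second dict pass, B flattens all (name, data) pairs once, dedups the names in order of first appearance, and builds each bucket in one shot by filtering the flat list and sorting it as it is put into the result comprehension.
import Mathlib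
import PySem

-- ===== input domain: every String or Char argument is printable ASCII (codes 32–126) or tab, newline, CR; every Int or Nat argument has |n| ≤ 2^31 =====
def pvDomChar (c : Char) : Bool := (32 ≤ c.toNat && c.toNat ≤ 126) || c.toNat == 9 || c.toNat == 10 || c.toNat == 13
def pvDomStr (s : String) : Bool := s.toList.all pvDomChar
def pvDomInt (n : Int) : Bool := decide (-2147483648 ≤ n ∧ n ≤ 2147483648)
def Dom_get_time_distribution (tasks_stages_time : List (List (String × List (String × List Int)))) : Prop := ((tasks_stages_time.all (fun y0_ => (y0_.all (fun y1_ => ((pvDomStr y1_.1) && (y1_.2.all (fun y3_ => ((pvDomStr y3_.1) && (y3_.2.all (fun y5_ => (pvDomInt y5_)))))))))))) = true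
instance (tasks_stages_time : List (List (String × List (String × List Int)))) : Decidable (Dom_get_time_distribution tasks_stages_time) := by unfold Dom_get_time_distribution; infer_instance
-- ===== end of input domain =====

-- B replaces A's incremental dict-bucket building + second sorting pass by one flatten,
-- an ordered dedup of the names, and a filter + sort per distinct name (objective: alternative).

-- ===== PORT A =====
-- A builds a dict of buckets with nested loops, then rewrites every bucket sorted in place.
-- info['stages'] raises KeyError when absent (excluded by Pre_), ported as getD with default [];
-- sorted's key x[0] raises IndexError on an empty stage_data (excluded by Pre_), ported as pyGetD x 0 0 —
-- both exact on the admitted inputs.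
def get_time_distribution (tasks_stages_time : List (List (String × List (String × List Int)))) : List (String × List (List Int)) :=
  let stages : PySem.Dict String (List (List Int)) :=
    tasks_stages_time.foldl (fun st info =>
      ((PySem.Dict.mk info).getD "stages" []).foldl (fun st p =>
        let st' := if st.contains p.1 then st else st.insert p.1 []
        st'.modify p.1 [] (fun b => b ++ [p.2])) st)
      (PySem.Dict.mk [])
  (stages.items.foldl (fun st q =>
      st.insert q.1 (PySem.List.sorted q.2 (fun x => PySem.List.pyGetD x 0 0) false)) stages).items

-- ===== PORT B =====
-- flatten once; names in first-appearance order (the 'not in names' loop = PySem.Set.ofList);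
-- each bucket built in one shot: filter the flat list, sort (same pyGetD/getD remarks as in A's port).
def get_time_distribution_alt (tasks_stages_time : List (List (String × List (String × List Int)))) : List (String × List (List Int)) :=
  let flat : List (String × List Int) :=
    tasks_stages_time.flatMap (fun info => (PySem.Dict.mk info).getD "stages" [])
  let names : PySem.Set String := PySem.Set.ofList (flat.map (fun p => p.1))
  names.map (fun n =>
    (n, PySem.List.sorted ((flat.filter (fun p => p.1 == n)).map (fun p => p.2))
          (fun x => PySem.List.pyGetD x 0 0) false))

-- ===== PRECONDITION & SPEC =====
-- Pre_ excludes exactly the inputs where the Python A raises: an info dict without the key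
-- 'stages' (KeyError) or an empty stage_data list (IndexError in sorted's key x[0]).
def Pre_get_time_distribution (tasks_stages_time : List (List (String × List (String × List Int)))) : Prop :=
  ∀ info ∈ tasks_stages_time,
    (PySem.Dict.mk info).contains "stages" = true ∧
    ∀ p ∈ (PySem.Dict.mk info).getD "stages" [], p.2 ≠ []
instance (tasks_stages_time : List (List (String × List (String × List Int)))) : Decidable (Pre_get_time_distribution tasks_stages_time) := by unfold Pre_get_time_distribution; infer_instance

def pvWitness_get_time_distribution : (List (List (String × List (String × List Int)))) :=
  [[("stages", [("load", [3, 1]), ("run", [2])])],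
   [("stages", [("run", [1, 5])])]]

def Spec_get_time_distribution (tasks_stages_time : List (List (String × List (String × List Int)))) (out : List (String × List (List Int))) : Prop := out = get_time_distribution_alt tasks_stages_time
instance (tasks_stages_time : List (List (String × List (String × List Int)))) (out : List (String × List (List Int))) : Decidable (Spec_get_time_distribution tasks_stages_time out) := by unfold Spec_get_time_distribution; infer_instance

-- ===== CLAIM (what is proved, stated in full; the proofs are below) =====
def Claim_equal_get_time_distribution : Prop := ∀ (tasks_stages_time : List (List (String × List (String × List Int)))), Dom_get_time_distribution tasks_stages_time → Pre_get_time_distribution tasks_stages_time → Spec_get_time_distribution tasks_stages_time (get_time_distribution tasks_stages_time)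

-- ===== LEMMAS AND PROOFS =====

-- inserting an absent key with [] and then modify-appending is just modify-appending
lemma insert_nil_modify {V : Type} (d : PySem.Dict String (List V)) (k : String) (v : V)
    (h : d.contains k = false) :
    (d.insert k []).modify k [] (fun b => b ++ [v]) = d.modify k [] (fun b => b ++ [v]) := by
  rw [PySem.Dict.modify, PySem.Dict.modify, PySem.Dict.getD_insert_self,
    PySem.Dict.insert_insert_self, PySem.Dict.getD_of_not_contains d [] h]

-- A's inner loop body ('setdefault-then-append') equals a plain modify-append
lemma step_eq_modify (st : PySem.Dict String (List (List Int))) (p : String × List Int) :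
    (if st.contains p.1 then st else st.insert p.1 []).modify p.1 [] (fun b => b ++ [p.2]) =
    st.modify p.1 [] (fun b => b ++ [p.2]) := by
  by_cases h : st.contains p.1 = true
  · simp [h]
  · simp only [Bool.not_eq_true] at h
    simp [h, insert_nil_modify st p.1 p.2 h]

-- a fold of key-wise inserts over pairs whose keys avoid k leaves getD k unchanged
lemma getD_foldl_insert_not_mem (l : List (String × List (List Int)))
    (d : PySem.Dict String (List (List Int))) (k : String)
    (h : k ∉ l.map (fun q => q.1)) (g : String × List (List Int) → List (List Int)) :
    (l.foldl (fun st q => st.insert q.1 (g q)) d).getD k [] = d.getD k [] := by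
  induction l generalizing d with
  | nil => rfl
  | cons a l ih =>
    simp only [List.map_cons, List.mem_cons, not_or] at h
    simp only [List.foldl_cons]
    rw [ih _ h.2, PySem.Dict.getD_insert_of_ne _ _ _ h.1]

-- with nodup keys, the fold of inserts sets key k to g (k, v) for (k, v) ∈ l
lemma getD_foldl_insert_mem (l : List (String × List (List Int)))
    (d : PySem.Dict String (List (List Int))) (k : String) (v : List (List Int))
    (hnd : (l.map (fun q => q.1)).Nodup) (hm : (k, v) ∈ l)
    (g : String × List (List Int) → List (List Int)) :
    (l.foldl (fun st q => st.insert q.1 (g q)) d).getD k [] = g (k, v) := by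
  induction l generalizing d with
  | nil => cases hm
  | cons a l ih =>
    simp only [List.map_cons, List.nodup_cons] at hnd
    rcases List.mem_cons.mp hm with h | h
    · subst h
      simp only [List.foldl_cons]
      rw [getD_foldl_insert_not_mem l _ k (by simpa using hnd.1) g,
        PySem.Dict.getD_insert_self]
    · simp only [List.foldl_cons]
      exact ih _ hnd.2 h

lemma set_update_subset {α : Type} [BEq α] [LawfulBEq α] (s : PySem.Set α) (l : List α)
    (h : ∀ x ∈ l, x ∈ s) : PySem.Set.update s l = s := by
  induction l generalizing s with
  | nil => rfl
  | cons a l ih =>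
    simp only [PySem.Set.update, List.foldl_cons] at *
    rw [PySem.Set.add_of_mem (h a (by simp))]
    exact ih s (fun x hx => h x (by simp [hx]))

-- rewriting every existing bucket in place (A's second loop) is mapping over the items
lemma foldl_insert_own_items (d : PySem.Dict String (List (List Int)))
    (hnd : d.keys.Nodup) (f : List (List Int) → List (List Int)) :
    (d.items.foldl (fun st q => st.insert q.1 (f q.2)) d).items =
      d.items.map (fun q => (q.1, f q.2)) := by
  have hkeys : (d.items.foldl (fun st q => st.insert q.1 (f q.2)) d).keys = d.keys := by
    rw [PySem.Dict.keys_foldl_insert_key d.items (fun q => q.1) (fun _ q => f q.2) d]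
    exact set_update_subset d.keys _ (fun x hx => hx)
  have hnd' : (d.items.foldl (fun st q => st.insert q.1 (f q.2)) d).keys.Nodup := by
    rw [hkeys]; exact hnd
  rw [PySem.Dict.items_eq_map_keys _ hnd' [], hkeys]
  conv_rhs => rw [PySem.Dict.items_eq_map_keys d hnd [], List.map_map]
  apply List.map_congr_left
  intro k hk
  have hitem : (k, d.getD k []) ∈ d.items := by
    rcases List.mem_map.mp (show k ∈ d.items.map (fun q => q.1) from hk) with ⟨⟨k1, v1⟩, hq, rfl⟩
    have := PySem.Dict.getD_of_mem_items d (k := k1) (v := v1) hq hnd []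
    rw [this]; exact hq
  simp only [Function.comp]
  rw [getD_foldl_insert_mem d.items d k (d.getD k []) hnd hitem (fun q => f q.2)]

-- the two ports agree on every input (the Lean ports are total; Pre_ only marks where Python A raises)
lemma ports_agree (tasks : List (List (String × List (String × List Int)))) :
    get_time_distribution tasks = get_time_distribution_alt tasks := by
  simp only [get_time_distribution, get_time_distribution_alt]
  have hstep : (fun (st : PySem.Dict String (List (List Int))) (p : String × List Int) =>
      (if st.contains p.1 then st else st.insert p.1 []).modify p.1 [] (fun b => b ++ [p.2])) =
      fun st p => st.modify p.1 [] (fun b => b ++ [p.2]) := funext₂ step_eq_modify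
  rw [hstep]
  rw [← List.foldl_flatMap]
  set flat := tasks.flatMap (fun info => (PySem.Dict.mk info).getD "stages" []) with hflat
  set stages := flat.foldl (fun st p => st.modify p.1 [] (fun b => b ++ [p.2])) (PySem.Dict.mk []) with hst
  have hnd : stages.keys.Nodup := by
    rw [hst]
    exact PySem.Dict.nodup_keys_foldl_modify_key flat (fun p => p.1) []
      (fun d p => fun b => b ++ [p.2]) (PySem.Dict.mk []) (by simp [PySem.Dict.keys])
  rw [foldl_insert_own_items stages hnd
    (fun v => PySem.List.sorted v (fun x => PySem.List.pyGetD x 0 0) false)]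
  have hkeys : stages.keys = PySem.Set.ofList (flat.map (fun p => p.1)) := by
    rw [hst, PySem.Dict.keys_foldl_modify_key flat (fun p => p.1) []
      (fun d p => fun b => b ++ [p.2]) (PySem.Dict.mk [])]
    rfl
  have hget : ∀ k, stages.getD k [] = (flat.filter (fun p => p.1 == k)).map (fun p => p.2) := by
    intro k
    rw [hst, PySem.Dict.getD_foldl_modify_append flat (PySem.Dict.mk []) k]
    rfl
  rw [PySem.Dict.items_eq_map_keys stages hnd [], hkeys, List.map_map]
  apply List.map_congr_left
  intro k hk
  simp [hget k]

-- ===== VERDICT (by name: the statement is the Claim_ definition above) =====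
theorem get_time_distribution_spec : Claim_equal_get_time_distribution := by
  intro tasks _ _
  exact ports_agree tasks
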